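-- pv_equiv track=rewrite | github.com/StenoHarri/Froj | map_keysymbols_to_steno_chords.py | generate_every_split_of_a_morpheme_via_syllables
-- ===== SOURCE A (Python) =====
-- def generate_every_split_of_a_morpheme_via_syllables(morpheme):
--
--
--     combinations_to_search_with=[]
--     for position_of_sound in range(2**(len(morpheme)-1)):
--         # Generate binary masks for the morpheme
--         bin_mask = "1"+(format(position_of_sound, '{fill}{width}b'.format(width= len(morpheme)-1, fill=0)))
--         if bin_mask=="10":
--             bin_mask="1"
--
--         #inefficient, as these could have been simply not generated in the first space
--         is_split_already_in_the_correct_spot = True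
--         for position in range(len(bin_mask)):
--             if morpheme[position]==('.'):
--                 if not (bin_mask[position] == "1" and bin_mask[position+1] == "1"):
--                     is_split_already_in_the_correct_spot=False
--         if not is_split_already_in_the_correct_spot:
--             continue
--
--
--
--         # Combine the binary mask with the morpheme
--         combination_to_search_with = []
--         for position in range(len(bin_mask)):
--
--             if morpheme[position] == ".":
--                 continue
--
--             #if it's 1, add the morpheme ["i"]+["d"] = ["i"]+["d"]
--             if bin_mask[position]=="1" or morpheme[position-1] == ".":
--                 combination_to_search_with+=([morpheme[position]])
--
--             #if it's O, add the morpheme  ["i"]+["d"] = ["i d"]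
--             else:
--                 combination_to_search_with[-1]+=" "+morpheme[position]
--         combinations_to_search_with+=[combination_to_search_with]
--     return combinations_to_search_with
-- ===== SOURCE B (Python) =====
-- def generate_every_split_of_a_morpheme_via_syllables(morpheme):
--     # Walk the morpheme once, recursively branching only at positions where a
--     # split is optional; positions forced by '.' markers never branch, so no
--     # 2^(n-1) mask enumeration and no validity filtering is needed.
--     def go(chars, forced, acc):
--         if not chars:
--             return [acc]
--         c, rest = chars[0], chars[1:]
--         if c == '.':
--             return go(rest, True, acc)
--         if forced:
--             return go(rest, False, acc + [c])
--         return (go(rest, False, acc[:-1] + [acc[-1] + " " + c])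
--                 + go(rest, False, acc + [c]))
--     return go(list(morpheme), True, [])
-- ===== Notes on version B (the rewrite author's own statement) =====
-- stated objective: alternative
-- what changed: B replaces A's enumeration of all 2^(n-1) binary masks followed by validity filtering with a single recursive walk over the morpheme that branches only at genuinely optional split points ('.'-forced positions never branch), so only valid splits are ever generated, in the same order (intended as faster per split; a timing run could not confirm it on output-exponential inputs).
-- intended difference: On 2-character morphemes (no leading/trailing '.'), A's special-case for the mask string '10' (meant only for 1-character input) truncates the no-split mask, so A returns [[c0],[c0,c1]] dropping the second character from the unsplit option, while B returns the intended [[c0 ++ ' ' ++ c1],[c0,c1]]. — e.g. on generate_every_split_of_a_morpheme_via_syllables("ab"): A returns [["a"], ["a", "b"]], B returns [["a b"], ["a", "b"]]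
import Mathlib
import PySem

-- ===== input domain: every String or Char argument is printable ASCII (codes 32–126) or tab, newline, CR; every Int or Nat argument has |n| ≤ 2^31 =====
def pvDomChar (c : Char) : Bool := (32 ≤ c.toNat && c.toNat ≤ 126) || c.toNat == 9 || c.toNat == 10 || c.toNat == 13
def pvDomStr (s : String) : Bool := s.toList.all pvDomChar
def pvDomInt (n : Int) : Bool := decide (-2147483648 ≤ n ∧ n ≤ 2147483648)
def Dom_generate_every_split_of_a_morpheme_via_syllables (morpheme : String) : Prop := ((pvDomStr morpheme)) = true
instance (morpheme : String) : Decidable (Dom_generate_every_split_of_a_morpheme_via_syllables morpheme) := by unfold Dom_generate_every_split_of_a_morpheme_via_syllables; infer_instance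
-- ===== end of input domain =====

-- B replaces A's 2^(n-1)-mask enumeration + filtering by one recursive walk that branches
-- only at optional split points, generating exactly the valid splits (objective: alternative).

-- ===== PORT A =====
-- hand port of format(p, '0{w}b') for p ≥ 0: binary digits of p (fuel-structural division loop),
-- left-padded with '0' to width w; exact for the Nat arguments A uses.
def pvBinAuxF : Nat → Nat → List Char → List Char
  | 0, _, acc => acc
  | fuel + 1, p, acc =>
      if p = 0 then acc
      else pvBinAuxF fuel (p / 2) ((if p % 2 = 1 then '1' else '0') :: acc)

def pvBinDigits (p : Nat) : List Char := if p = 0 then ['0'] else pvBinAuxF p p []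

def pvBinFormat (w p : Nat) : List Char :=
  List.replicate (w - (pvBinDigits p).length) '0' ++ pvBinDigits p

-- literal transliteration of A; inner index accesses use getD '?' where Python indexes
-- (Python raises IndexError only outside Pre_, where nothing is claimed); morpheme[position-1]
-- at position 0 is Python's wraparound morpheme[-1], ported with PySem.List.pyGet?.
def generate_every_split_of_a_morpheme_via_syllables (morpheme : String) : List (List String) :=
  let cs := morpheme.toList
  let n := cs.length
  (List.range (2 ^ (n - 1))).foldl
    (fun combos p =>
      let bm0 : List Char := '1' :: pvBinFormat (n - 1) p
      let bm : List Char := if bm0 = ['1', '0'] then ['1'] else bm0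
      let ok : Bool := (List.range bm.length).foldl
        (fun flag position =>
          if cs.getD position '?' == '.' then
            flag && ((bm.getD position '?' == '1') && (bm.getD (position + 1) '?' == '1'))
          else flag) true
      if ok then
        combos ++ [(List.range bm.length).foldl
          (fun acc position =>
            let c := cs.getD position '?'
            if c == '.' then acc
            else if (bm.getD position '?' == '1') || ((PySem.List.pyGet? cs ((position : Int) - 1)).getD '?' == '.') then
              acc ++ [String.ofList [c]]
            else acc.dropLast ++ [acc.getLast?.getD "" ++ " " ++ String.ofList [c]]) []]
      else combos) []

-- ===== PORT B =====
def pvAltGo : List Char → Bool → List String → List (List String)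
  | [], _, acc => [acc]
  | c :: rest, forced, acc =>
      if c == '.' then pvAltGo rest true acc
      else if forced then pvAltGo rest false (acc ++ [String.ofList [c]])
      else pvAltGo rest false (acc.dropLast ++ [acc.getLast?.getD "" ++ " " ++ String.ofList [c]]) ++
           pvAltGo rest false (acc ++ [String.ofList [c]])

def generate_every_split_of_a_morpheme_via_syllables_alt (morpheme : String) : List (List String) :=
  pvAltGo morpheme.toList true []

-- ===== PRECONDITION & SPEC =====
-- Pre_ excludes exactly the inputs where the Python A raises: the empty morpheme (TypeError),
-- morphemes ending in '.' (IndexError), and 2-character morphemes starting with '.' (IndexError).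
def Pre_generate_every_split_of_a_morpheme_via_syllables (morpheme : String) : Prop :=
  morpheme.toList ≠ [] ∧ morpheme.toList.getLast? ≠ some '.' ∧
    ¬(morpheme.toList.length = 2 ∧ morpheme.toList[0]? = some '.')
instance (morpheme : String) : Decidable (Pre_generate_every_split_of_a_morpheme_via_syllables morpheme) := by
  unfold Pre_generate_every_split_of_a_morpheme_via_syllables; infer_instance

def pvWitness_generate_every_split_of_a_morpheme_via_syllables : String := "abc"

-- On 2-character morphemes A's '10'-mask special case (meant only for 1-character input) truncates
-- the no-split mask, so A returns [[c0],[c0,c1]] dropping the second character from the unsplit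
-- option, while B returns the intended [[c0 ++ " " ++ c1],[c0,c1]].
def D_generate_every_split_of_a_morpheme_via_syllables (morpheme : String) : Prop :=
  morpheme.toList.length = 2
instance (morpheme : String) : Decidable (D_generate_every_split_of_a_morpheme_via_syllables morpheme) := by
  unfold D_generate_every_split_of_a_morpheme_via_syllables; infer_instance

def Spec_generate_every_split_of_a_morpheme_via_syllables (morpheme : String) (out : List (List String)) : Prop :=
  ¬ D_generate_every_split_of_a_morpheme_via_syllables morpheme →
    out = generate_every_split_of_a_morpheme_via_syllables_alt morpheme
instance (morpheme : String) (out : List (List String)) : Decidable (Spec_generate_every_split_of_a_morpheme_via_syllables morpheme out) := by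
  unfold Spec_generate_every_split_of_a_morpheme_via_syllables; infer_instance

def pvDiffWitness_generate_every_split_of_a_morpheme_via_syllables : String := "ab"
def pvDiffWitnessOut_generate_every_split_of_a_morpheme_via_syllables : (List (List String)) × (List (List String)) :=
  ([["a"], ["a", "b"]], [["a b"], ["a", "b"]])

-- ===== CLAIM (what is proved, stated in full; the proofs are below) =====
def Claim_unchanged_generate_every_split_of_a_morpheme_via_syllables : Prop := ∀ (morpheme : String), Dom_generate_every_split_of_a_morpheme_via_syllables morpheme → Pre_generate_every_split_of_a_morpheme_via_syllables morpheme → Spec_generate_every_split_of_a_morpheme_via_syllables morpheme (generate_every_split_of_a_morpheme_via_syllables morpheme)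
def Claim_changed_generate_every_split_of_a_morpheme_via_syllables : Prop := Dom_generate_every_split_of_a_morpheme_via_syllables (pvDiffWitness_generate_every_split_of_a_morpheme_via_syllables) ∧ Pre_generate_every_split_of_a_morpheme_via_syllables (pvDiffWitness_generate_every_split_of_a_morpheme_via_syllables) ∧ D_generate_every_split_of_a_morpheme_via_syllables (pvDiffWitness_generate_every_split_of_a_morpheme_via_syllables) ∧ generate_every_split_of_a_morpheme_via_syllables (pvDiffWitness_generate_every_split_of_a_morpheme_via_syllables) = pvDiffWitnessOut_generate_every_split_of_a_morpheme_via_syllables.1 ∧ generate_every_split_of_a_morpheme_via_syllables_alt (pvDiffWitness_generate_every_split_of_a_morpheme_via_syllables) = pvDiffWitnessOut_generate_every_split_of_a_morpheme_via_syllables.2 ∧ pvDiffWitnessOut_generate_every_split_of_a_morpheme_via_syllables.1 ≠ pvDiffWitnessOut_generate_every_split_of_a_morpheme_via_syllables.2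
def Claim_exact_generate_every_split_of_a_morpheme_via_syllables : Prop := ∀ (morpheme : String), Dom_generate_every_split_of_a_morpheme_via_syllables morpheme → Pre_generate_every_split_of_a_morpheme_via_syllables morpheme → D_generate_every_split_of_a_morpheme_via_syllables morpheme → generate_every_split_of_a_morpheme_via_syllables morpheme ≠ generate_every_split_of_a_morpheme_via_syllables_alt morpheme

-- ===== LEMMAS AND PROOFS =====

-- big-endian binary digits, proof-side mirror of pvBinAuxF
def bitsBE : Nat → List Char
  | 0 => []
  | p + 1 => bitsBE ((p + 1) / 2) ++ [if (p + 1) % 2 = 1 then '1' else '0']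
decreasing_by exact Nat.div_lt_self (by omega) (by omega)

-- all bit vectors of width w, in the order A's integer loop enumerates them
def bitVecs : Nat → List (List Char)
  | 0 => [[]]
  | w + 1 => (bitVecs w).map ('0' :: ·) ++ (bitVecs w).map ('1' :: ·)

-- structural form of A's validity loop (b-list aligned with the char list)
def okS : List Char → List Char → Bool → Bool
  | c :: cs, b :: bs, flag =>
      okS cs bs (if c == '.' then flag && ((b == '1') && (bs.headD '?' == '1')) else flag)
  | _, _, flag => flag

-- structural form of A's building loop, carrying the previous character
def buildS : Char → List Char → List Char → List String → List String
  | pc, c :: cs, b :: bs, acc =>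
      buildS c cs bs
        (if c == '.' then acc
         else if (b == '1') || (pc == '.') then acc ++ [String.ofList [c]]
         else acc.dropLast ++ [acc.getLast?.getD "" ++ " " ++ String.ofList [c]])
  | _, _, _, acc => acc

-- prev-char-based validity predicate
def pvV : Char → List Char → List Char → Bool
  | pc, c :: cs, b :: bs => (if (c == '.') || (pc == '.') then b == '1' else true) && pvV c cs bs
  | _, _, _ => true

theorem pvBinAuxF_zero (fuel : Nat) (acc : List Char) : pvBinAuxF fuel 0 acc = acc := by
  cases fuel <;> simp [pvBinAuxF]

theorem bitsBE_pos (p : Nat) (hp : p ≠ 0) :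
    bitsBE p = bitsBE (p / 2) ++ [if p % 2 = 1 then '1' else '0'] := by
  obtain ⟨q, rfl⟩ : ∃ q, p = q + 1 := ⟨p - 1, by omega⟩
  rw [bitsBE]

theorem pvBinAuxF_eq : ∀ (fuel p : Nat) (acc : List Char), p ≠ 0 → p ≤ fuel →
    pvBinAuxF fuel p acc = bitsBE p ++ acc := by
  intro fuel
  induction fuel with
  | zero => intro p acc h1 h2; omega
  | succ fuel ih =>
    intro p acc h1 h2
    rw [pvBinAuxF, if_neg h1, bitsBE_pos p h1]
    by_cases hq : p / 2 = 0
    · have hp1 : p = 1 := by omega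
      subst hp1
      simp [hq, pvBinAuxF_zero, bitsBE]
    · rw [ih _ _ hq (by omega)]
      simp

theorem pvBinDigits_eq (p : Nat) (hp : p ≠ 0) : pvBinDigits p = bitsBE p := by
  simp [pvBinDigits, hp, pvBinAuxF_eq p p [] hp le_rfl]

theorem bitsBE_len_le : ∀ (w p : Nat), p < 2 ^ w → (bitsBE p).length ≤ w := by
  intro w
  induction w with
  | zero => intro p hp; interval_cases p; simp [bitsBE]
  | succ w ih =>
    intro p hp
    by_cases h0 : p = 0
    · subst h0; simp [bitsBE]
    · have hpow : 2 ^ (w + 1) = 2 * 2 ^ w := by rw [pow_succ]; ring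
      have := ih (p / 2) (by omega)
      rw [bitsBE_pos p h0]
      simp only [List.length_append, List.length_cons, List.length_nil]
      omega

theorem bitsBE_len_ge : ∀ (w p : Nat), 2 ^ w ≤ p → w + 1 ≤ (bitsBE p).length := by
  intro w
  induction w with
  | zero =>
    intro p hp
    rw [bitsBE_pos p (by omega)]
    simp
  | succ w ih =>
    intro p hp
    have hpow : 2 ^ (w + 1) = 2 * 2 ^ w := by rw [pow_succ]; ring
    have hpos : 0 < 2 ^ w := Nat.two_pow_pos w
    have := ih (p / 2) (by omega)
    rw [bitsBE_pos p (by omega)]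
    simp only [List.length_append, List.length_cons, List.length_nil]
    omega

theorem bitsBE_decomp : ∀ (w p : Nat), p < 2 ^ w →
    bitsBE (2 ^ w + p) = '1' :: (List.replicate (w - (bitsBE p).length) '0' ++ bitsBE p) := by
  intro w
  induction w with
  | zero =>
    intro p hp
    have h0 : p = 0 := by omega
    subst h0
    have e : 2 ^ 0 + 0 = 1 := rfl
    rw [e, bitsBE_pos 1 (by omega)]
    simp [bitsBE]
  | succ w ih =>
    intro p hp
    have hpow : 2 ^ (w + 1) = 2 * 2 ^ w := by rw [pow_succ]; ring
    have hpos : 0 < 2 ^ w := Nat.two_pow_pos w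
    rw [bitsBE_pos (2 ^ (w + 1) + p) (by omega)]
    have h1 : (2 ^ (w + 1) + p) / 2 = 2 ^ w + p / 2 := by omega
    have h2 : (2 ^ (w + 1) + p) % 2 = p % 2 := by omega
    rw [h1, h2, ih (p / 2) (by omega)]
    by_cases hp0 : p = 0
    · subst hp0
      simp [bitsBE, ← List.replicate_succ']
    · rw [bitsBE_pos p hp0]
      have h3 : w + 1 - (bitsBE (p / 2) ++ [if p % 2 = 1 then '1' else '0']).length
          = w - (bitsBE (p / 2)).length := by simp
      rw [h3]
      simp

theorem pvBinFormat_len (w p : Nat) (hw : 1 ≤ w) (hp : p < 2 ^ w) : (pvBinFormat w p).length = w := by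
  by_cases h0 : p = 0
  · subst h0; simp [pvBinFormat, pvBinDigits]; omega
  · have h1 : (bitsBE p).length ≤ w := bitsBE_len_le w p hp
    have h2 : 1 ≤ (bitsBE p).length := bitsBE_len_ge 0 p (by omega)
    simp [pvBinFormat, pvBinDigits_eq p h0]
    omega

theorem pvBinFormat_zero (w : Nat) (hw : 1 ≤ w) : pvBinFormat w 0 = List.replicate w '0' := by
  obtain ⟨v, rfl⟩ : ∃ v, w = v + 1 := ⟨w - 1, by omega⟩
  simp [pvBinFormat, pvBinDigits, List.replicate_succ']

theorem pvBinFormat_lo (w p : Nat) (hw : 1 ≤ w) (hp : p < 2 ^ w) :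
    pvBinFormat (w + 1) p = '0' :: pvBinFormat w p := by
  by_cases h0 : p = 0
  · subst h0
    rw [pvBinFormat_zero (w + 1) (by omega), pvBinFormat_zero w hw, List.replicate_succ]
  · have h1 : (bitsBE p).length ≤ w := bitsBE_len_le w p hp
    simp only [pvBinFormat, pvBinDigits_eq p h0]
    have h2 : w + 1 - (bitsBE p).length = (w - (bitsBE p).length) + 1 := by omega
    rw [h2, List.replicate_succ]
    simp

theorem pvBinFormat_hi (w p : Nat) (hw : 1 ≤ w) (hp : p < 2 ^ w) :
    pvBinFormat (w + 1) (2 ^ w + p) = '1' :: pvBinFormat w p := by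
  have hpos : 0 < 2 ^ w := Nat.two_pow_pos w
  have hl : (bitsBE p).length ≤ w := bitsBE_len_le w p hp
  have key := bitsBE_decomp w p hp
  have hne : 2 ^ w + p ≠ 0 := by omega
  have hlen : w + 1 - (bitsBE (2 ^ w + p)).length = 0 := by rw [key]; simp; omega
  by_cases hp0 : p = 0
  · subst hp0
    rw [pvBinFormat_zero w hw]
    simp only [pvBinFormat, pvBinDigits_eq _ hne]
    rw [hlen, key]
    simp [bitsBE]
  · simp only [pvBinFormat, pvBinDigits_eq _ hne, pvBinDigits_eq p hp0]
    rw [hlen, key]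
    simp

theorem range_map_pvBinFormat : ∀ (w : Nat), 1 ≤ w →
    (List.range (2 ^ w)).map (pvBinFormat w) = bitVecs w := by
  intro w
  induction w with
  | zero => intro h; omega
  | succ w ih =>
    intro _
    by_cases hw0 : w = 0
    · subst hw0; decide
    · have hw1 : 1 ≤ w := by omega
      have hpow : 2 ^ (w + 1) = 2 ^ w + 2 ^ w := by rw [pow_succ]; ring
      rw [hpow, List.range_add, List.map_append, List.map_map]
      show (List.range (2 ^ w)).map (pvBinFormat (w + 1)) ++
          (List.range (2 ^ w)).map (fun p => pvBinFormat (w + 1) (2 ^ w + p)) = bitVecs (w + 1)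
      have e1 : (List.range (2 ^ w)).map (pvBinFormat (w + 1)) =
          (List.range (2 ^ w)).map (fun p => '0' :: pvBinFormat w p) :=
        List.map_congr_left fun p hp => pvBinFormat_lo w p hw1 (List.mem_range.mp hp)
      have e2 : (List.range (2 ^ w)).map (fun p => pvBinFormat (w + 1) (2 ^ w + p)) =
          (List.range (2 ^ w)).map (fun p => '1' :: pvBinFormat w p) :=
        List.map_congr_left fun p hp => pvBinFormat_hi w p hw1 (List.mem_range.mp hp)
      rw [e1, e2]
      show (List.range (2 ^ w)).map (('0' :: ·) ∘ pvBinFormat w) ++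
          (List.range (2 ^ w)).map (('1' :: ·) ∘ pvBinFormat w) = bitVecs (w + 1)
      rw [← List.map_map, ← List.map_map, ih hw1]
      rfl

theorem map_filter_eq_flatMap_if {α β : Type} (p : α → Bool) (f : α → β) :
    ∀ (l : List α), (l.filter p).map f = l.flatMap (fun x => if p x then [f x] else []) := by
  intro l; induction l with
  | nil => rfl
  | cons x xs ih => by_cases h : p x <;> simp [List.filter, h, ih]

theorem flatMap_congr_of_mem {α β : Type} (l : List α) (f g : α → List β)
    (h : ∀ x ∈ l, f x = g x) : l.flatMap f = l.flatMap g := by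
  induction l with
  | nil => rfl
  | cons x xs ih => simp [List.flatMap_cons, h x (by simp), ih fun y hy => h y (by simp [hy])]

theorem getD_append_self {α : Type} (l1 l2 : List α) (x d : α) :
    (l1 ++ x :: l2).getD l1.length d = x := by
  rw [List.getD_eq_getElem?_getD, List.getElem?_append_right (le_refl l1.length)]
  simp

theorem getD_append_succ {α : Type} (l1 l2 : List α) (x d : α) :
    (l1 ++ x :: l2).getD (l1.length + 1) d = l2.headD d := by
  rw [List.getD_eq_getElem?_getD, List.getElem?_append_right (by omega)]
  have e : l1.length + 1 - l1.length = 1 := by omega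
  rw [e]
  cases l2 <;> simp

theorem pyGetD_append_pred {α : Type} (l1 l2 : List α) (d : α) (h : l1 ≠ []) :
    (PySem.List.pyGet? (l1 ++ l2) ((l1.length : Int) - 1)).getD d = l1.getLast h := by
  have hpos : 0 < l1.length := List.length_pos_of_ne_nil h
  have e : ((l1.length : Int) - 1) = ((l1.length - 1 : Nat) : Int) := by omega
  rw [e, PySem.List.pyGet?_natCast, List.getElem?_append_left (by omega),
    ← List.getLast?_eq_getElem?, List.getLast?_eq_some_getLast h]
  rfl

theorem ok_conv : ∀ (suf sufB pre preB : List Char) (flag : Bool),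
    suf.length = sufB.length → pre.length = preB.length →
    (List.range' pre.length suf.length).foldl
      (fun flag position =>
        if (pre ++ suf).getD position '?' == '.' then
          flag && (((preB ++ sufB).getD position '?' == '1') && ((preB ++ sufB).getD (position + 1) '?' == '1'))
        else flag) flag
    = okS suf sufB flag := by
  intro suf
  induction suf with
  | nil =>
    intro sufB pre preB flag h1 h2
    cases sufB with
    | nil => simp [okS]
    | cons _ _ => simp at h1
  | cons c cs ih =>
    intro sufB pre preB flag h1 h2
    cases sufB with
    | nil => simp at h1
    | cons b bs =>
      have e1 : (pre ++ c :: cs).getD pre.length '?' = c := getD_append_self pre cs c '?'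
      have e2 : (preB ++ b :: bs).getD pre.length '?' = b := by
        rw [h2]; exact getD_append_self preB bs b '?'
      have e3 : (preB ++ b :: bs).getD (pre.length + 1) '?' = bs.headD '?' := by
        rw [h2]; exact getD_append_succ preB bs b '?'
      simp only [List.length_cons, List.range'_succ, List.foldl_cons, e1, e2, e3]
      rw [List.append_cons pre c cs, List.append_cons preB b bs]
      have h3 : pre.length + 1 = (pre ++ [c]).length := by simp
      rw [h3]
      rw [ih bs (pre ++ [c]) (preB ++ [b]) _ (by simpa using h1) (by simp [h2])]
      simp only [okS]

theorem build_conv : ∀ (suf sufB pre preB : List Char) (acc : List String) (hpre : pre ≠ []),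
    suf.length = sufB.length → pre.length = preB.length →
    (List.range' pre.length suf.length).foldl
      (fun acc position =>
        let c := (pre ++ suf).getD position '?'
        if c == '.' then acc
        else if ((preB ++ sufB).getD position '?' == '1') || ((PySem.List.pyGet? (pre ++ suf) ((position : Int) - 1)).getD '?' == '.') then
          acc ++ [String.ofList [c]]
        else acc.dropLast ++ [acc.getLast?.getD "" ++ " " ++ String.ofList [c]]) acc
    = buildS (pre.getLast hpre) suf sufB acc := by
  intro suf
  induction suf with
  | nil =>
    intro sufB pre preB acc hpre h1 h2
    cases sufB with
    | nil => cases pre <;> simp [buildS]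
    | cons _ _ => simp at h1
  | cons c cs ih =>
    intro sufB pre preB acc hpre h1 h2
    cases sufB with
    | nil => simp at h1
    | cons b bs =>
      have e1 : (pre ++ c :: cs).getD pre.length '?' = c := getD_append_self pre cs c '?'
      have e2 : (preB ++ b :: bs).getD pre.length '?' = b := by
        rw [h2]; exact getD_append_self preB bs b '?'
      have e3 : (PySem.List.pyGet? (pre ++ c :: cs) ((pre.length : Int) - 1)).getD '?'
          = pre.getLast hpre := pyGetD_append_pred pre (c :: cs) '?' hpre
      simp only [List.length_cons, List.range'_succ, List.foldl_cons, e1, e2, e3]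
      rw [List.append_cons pre c cs, List.append_cons preB b bs]
      have h3 : pre.length + 1 = (pre ++ [c]).length := by simp
      rw [h3]
      rw [ih bs (pre ++ [c]) (preB ++ [b]) _ (by simp) (by simpa using h1) (by simp [h2])]
      rw [List.getLast_append_singleton]
      simp only [buildS]

theorem okS_flag : ∀ (cs bs : List Char) (flag : Bool), okS cs bs flag = (flag && okS cs bs true) := by
  intro cs
  induction cs with
  | nil => intro bs flag; cases bs <;> simp [okS]
  | cons c cs ih =>
    intro bs flag
    cases bs with
    | nil => simp [okS]
    | cons b bs =>
      simp only [okS]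
      rw [ih bs (if c == '.' then flag && ((b == '1') && (bs.headD '?' == '1')) else flag),
        ih bs (if c == '.' then true && ((b == '1') && (bs.headD '?' == '1')) else true)]
      by_cases hc : c == '.' <;> cases flag <;> simp [hc]

theorem okS_eq_V : ∀ (cs bs : List Char) (pc : Char), cs.length = bs.length →
    cs.getLastD pc ≠ '.' →
    (okS cs bs true && (if pc == '.' then (bs.headD '?' == '1') else true)) = pvV pc cs bs := by
  intro cs
  induction cs with
  | nil =>
    intro bs pc h1 h2
    cases bs with
    | nil =>
      have : (pc == '.') = false := beq_eq_false_iff_ne.mpr (by simpa [List.getLastD] using h2)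
      simp [okS, pvV, this]
    | cons _ _ => simp at h1
  | cons c cs ih =>
    intro bs pc h1 h2
    cases bs with
    | nil => simp at h1
    | cons b bs =>
      rw [List.getLastD_cons] at h2
      have h2' : cs.getLastD c ≠ '.' := h2
      simp only [okS, pvV]
      rw [okS_flag cs bs (if c == '.' then true && ((b == '1') && (bs.headD '?' == '1')) else true)]
      rw [← ih bs c (by simpa using h1) h2']
      by_cases hc : c == '.' <;> by_cases hpc : pc == '.' <;> simp [hc, hpc] <;>
        cases (b == '1') <;> cases (bs.headD '?' == '1') <;> cases okS cs bs true <;> simp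

theorem main_L : ∀ (cs : List Char) (pc : Char) (acc : List String), cs.getLastD pc ≠ '.' →
    (bitVecs cs.length).flatMap
      (fun bs => if pvV pc cs bs then [buildS pc cs bs acc] else [])
    = pvAltGo cs (pc == '.') acc := by
  intro cs
  induction cs with
  | nil =>
    intro pc acc _
    simp [bitVecs, pvV, buildS, pvAltGo]
  | cons c cs ih =>
    intro pc acc h
    rw [List.getLastD_cons] at h
    simp only [List.length_cons, bitVecs, List.flatMap_append, List.flatMap_map]
    by_cases hc : c = '.'
    · subst hc
      rw [flatMap_congr_of_mem (bitVecs cs.length)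
          (fun bs => if pvV pc ('.' :: cs) ('0' :: bs) then [buildS pc ('.' :: cs) ('0' :: bs) acc] else [])
          (fun _ => ([] : List (List String)))
          (by intro bs _; simp [pvV]),
        flatMap_congr_of_mem (bitVecs cs.length)
          (fun bs => if pvV pc ('.' :: cs) ('1' :: bs) then [buildS pc ('.' :: cs) ('1' :: bs) acc] else [])
          (fun bs => if pvV '.' cs bs then [buildS '.' cs bs acc] else [])
          (by intro bs _; simp [pvV, buildS]),
        ih '.' acc h]
      simp [pvAltGo]
    · have hc' : (c == '.') = false := beq_eq_false_iff_ne.mpr hc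
      by_cases hpc : pc = '.'
      · subst hpc
        rw [flatMap_congr_of_mem (bitVecs cs.length)
            (fun bs => if pvV '.' (c :: cs) ('0' :: bs) then [buildS '.' (c :: cs) ('0' :: bs) acc] else [])
            (fun _ => ([] : List (List String)))
            (by intro bs _; simp [pvV, hc']),
          flatMap_congr_of_mem (bitVecs cs.length)
            (fun bs => if pvV '.' (c :: cs) ('1' :: bs) then [buildS '.' (c :: cs) ('1' :: bs) acc] else [])
            (fun bs => if pvV c cs bs then [buildS c cs bs (acc ++ [String.ofList [c]])] else [])
            (by intro bs _; simp [pvV, buildS, hc']),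
          ih c (acc ++ [String.ofList [c]]) h]
        simp [pvAltGo, hc']
      · have hpc' : (pc == '.') = false := beq_eq_false_iff_ne.mpr hpc
        rw [flatMap_congr_of_mem (bitVecs cs.length)
            (fun bs => if pvV pc (c :: cs) ('0' :: bs) then [buildS pc (c :: cs) ('0' :: bs) acc] else [])
            (fun bs => if pvV c cs bs then
              [buildS c cs bs (acc.dropLast ++ [acc.getLast?.getD "" ++ " " ++ String.ofList [c]])] else [])
            (by intro bs _; simp [pvV, buildS, hc', hpc']),
          flatMap_congr_of_mem (bitVecs cs.length)
            (fun bs => if pvV pc (c :: cs) ('1' :: bs) then [buildS pc (c :: cs) ('1' :: bs) acc] else [])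
            (fun bs => if pvV c cs bs then [buildS c cs bs (acc ++ [String.ofList [c]])] else [])
            (by intro bs _; simp [pvV, buildS, hc', hpc']),
          ih c _ h, ih c _ h]
        simp [pvAltGo, hc', hpc']

-- evaluation of A's loop body on one mask of width ≥ 2, inside Pre_
theorem body_eq (c0 : Char) (rest bs : List Char) (hlen : bs.length = rest.length)
    (hw : 2 ≤ rest.length) (hlast : rest.getLastD c0 ≠ '.') :
    (let bm0 : List Char := '1' :: bs
     let bm : List Char := if bm0 = ['1', '0'] then ['1'] else bm0
     let ok : Bool := (List.range bm.length).foldl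
       (fun flag position =>
         if (c0 :: rest).getD position '?' == '.' then
           flag && ((bm.getD position '?' == '1') && (bm.getD (position + 1) '?' == '1'))
         else flag) true
     if ok then
       [(List.range bm.length).foldl
         (fun acc position =>
           let c := (c0 :: rest).getD position '?'
           if c == '.' then acc
           else if (bm.getD position '?' == '1') || ((PySem.List.pyGet? (c0 :: rest) ((position : Int) - 1)).getD '?' == '.') then
             acc ++ [String.ofList [c]]
           else acc.dropLast ++ [acc.getLast?.getD "" ++ " " ++ String.ofList [c]]) []]
     else [])
    = if pvV c0 rest bs then
        [buildS c0 rest bs (if c0 == '.' then [] else [String.ofList [c0]])] else [] := by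
  have hbm : ('1' :: bs) ≠ (['1', '0'] : List Char) := by
    intro hh
    apply_fun List.length at hh
    simp [hlen] at hh
    omega
  simp only [if_neg hbm]
  have hlen1 : ('1' :: bs).length = (c0 :: rest).length := by simp [hlen]
  have hok : (List.range ('1' :: bs).length).foldl
      (fun flag position =>
        if (c0 :: rest).getD position '?' == '.' then
          flag && ((('1' :: bs).getD position '?' == '1') && (('1' :: bs).getD (position + 1) '?' == '1'))
        else flag) true = pvV c0 rest bs := by
    rw [hlen1, List.range_eq_range']
    have hc := ok_conv (c0 :: rest) ('1' :: bs) [] [] true (by simp [hlen]) rfl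
    simp only [List.nil_append, List.length_nil] at hc
    rw [hc]
    have hv := okS_eq_V (c0 :: rest) ('1' :: bs) 'x' (by simp [hlen])
      (by rw [List.getLastD_cons]; exact hlast)
    simpa [pvV] using hv
  rw [hok]
  have hbuild : (List.range ('1' :: bs).length).foldl
      (fun acc position =>
        let c := (c0 :: rest).getD position '?'
        if c == '.' then acc
        else if (('1' :: bs).getD position '?' == '1') || ((PySem.List.pyGet? (c0 :: rest) ((position : Int) - 1)).getD '?' == '.') then
          acc ++ [String.ofList [c]]
        else acc.dropLast ++ [acc.getLast?.getD "" ++ " " ++ String.ofList [c]]) []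
      = buildS c0 rest bs (if c0 == '.' then [] else [String.ofList [c0]]) := by
    rw [hlen1, List.range_eq_range']
    show (List.range' 0 (rest.length + 1)).foldl _ [] = _
    rw [List.range'_succ, List.foldl_cons]
    have hb := build_conv rest bs [c0] ['1']
      (if c0 == '.' then [] else [String.ofList [c0]]) (by simp) hlen.symm rfl
    simp only [List.singleton_append, List.length_cons, List.length_nil, List.getLast_singleton] at hb
    rw [← hb]
    congr 1
  rw [hbuild]

-- ===== VERDICT (by name: the statement is the Claim_ definition above) =====
theorem generate_every_split_of_a_morpheme_via_syllables_spec : Claim_unchanged_generate_every_split_of_a_morpheme_via_syllables := by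
  intro m _ hPre hD
  obtain ⟨hne, hlast, h2dot⟩ := hPre
  unfold D_generate_every_split_of_a_morpheme_via_syllables at hD
  unfold generate_every_split_of_a_morpheme_via_syllables
    generate_every_split_of_a_morpheme_via_syllables_alt
  rcases hcs : m.toList with _ | ⟨c0, rest⟩
  · exact absurd hcs hne
  rw [hcs] at hlast hD
  rcases rest with _ | ⟨c1, rest1⟩
  · -- length-1 morpheme
    have hc0 : c0 ≠ '.' := by simpa using hlast
    have hc0' : (c0 == '.') = false := beq_eq_false_iff_ne.mpr hc0
    simp [pvAltGo, hc0', hc0, pvBinFormat, pvBinDigits, pvBinAuxF, List.range_one]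
  rcases rest1 with _ | ⟨c2, rest2⟩
  · -- length-2 morpheme: excluded by ¬ D_
    simp at hD
  -- length ≥ 3
  have hlast' : (c1 :: c2 :: rest2).getLastD c0 ≠ '.' := by
    rw [List.getLast?_cons_cons] at hlast
    rw [List.getLastD_eq_getLast?]
    cases h : (c1 :: c2 :: rest2).getLast? with
    | none => exact absurd h (by simp)
    | some l =>
      rw [h] at hlast
      simpa using fun hh => hlast (by rw [hh])
  have hw : 2 ≤ (c1 :: c2 :: rest2).length := by simp
  have hw1 : 1 ≤ (c1 :: c2 :: rest2).length := by omega
  simp only [List.length_cons, Nat.add_sub_cancel]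
  rw [PySem.List.foldl_append_if, map_filter_eq_flatMap_if, List.nil_append]
  refine Eq.trans (flatMap_congr_of_mem _ _
    (fun p => if pvV c0 (c1 :: c2 :: rest2) (pvBinFormat (c1 :: c2 :: rest2).length p) then
      [buildS c0 (c1 :: c2 :: rest2) (pvBinFormat (c1 :: c2 :: rest2).length p)
        (if c0 == '.' then [] else [String.ofList [c0]])] else []) ?_) ?_
  · intro p hp
    have hp' : p < 2 ^ (c1 :: c2 :: rest2).length := List.mem_range.mp hp
    have hlen : (pvBinFormat (c1 :: c2 :: rest2).length p).length = (c1 :: c2 :: rest2).length :=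
      pvBinFormat_len _ _ hw1 hp'
    exact body_eq c0 (c1 :: c2 :: rest2) _ hlen hw hlast'
  · have he : rest2.length + 1 + 1 = (c1 :: c2 :: rest2).length := by simp
    rw [he]
    have hgen : (List.range (2 ^ (c1 :: c2 :: rest2).length)).flatMap
        (fun p => if pvV c0 (c1 :: c2 :: rest2) (pvBinFormat (c1 :: c2 :: rest2).length p) then
          [buildS c0 (c1 :: c2 :: rest2) (pvBinFormat (c1 :: c2 :: rest2).length p)
            (if c0 == '.' then [] else [String.ofList [c0]])] else [])
        = (bitVecs (c1 :: c2 :: rest2).length).flatMap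
          (fun bs => if pvV c0 (c1 :: c2 :: rest2) bs then
            [buildS c0 (c1 :: c2 :: rest2) bs (if c0 == '.' then [] else [String.ofList [c0]])] else []) := by
      rw [← range_map_pvBinFormat _ hw1, List.flatMap_map]
    rw [hgen, main_L (c1 :: c2 :: rest2) c0 _ hlast']
    by_cases hc0 : c0 == '.' <;> simp [pvAltGo, hc0]

theorem generate_every_split_of_a_morpheme_via_syllables_changed : Claim_changed_generate_every_split_of_a_morpheme_via_syllables := by
  unfold Claim_changed_generate_every_split_of_a_morpheme_via_syllables; decide

theorem generate_every_split_of_a_morpheme_via_syllables_tight : Claim_exact_generate_every_split_of_a_morpheme_via_syllables := by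
  intro m _ hPre hD
  obtain ⟨hne, hlast, h2dot⟩ := hPre
  unfold D_generate_every_split_of_a_morpheme_via_syllables at hD
  rcases hcs : m.toList with _ | ⟨a, rest⟩
  · rw [hcs] at hD; simp at hD
  rcases rest with _ | ⟨b, rest1⟩
  · rw [hcs] at hD; simp at hD
  rcases rest1 with _ | ⟨x, y⟩
  swap
  · rw [hcs] at hD; simp at hD
  rw [hcs] at hlast h2dot
  have hb : b ≠ '.' := by simpa using hlast
  have ha : a ≠ '.' := by
    intro hh
    exact h2dot ⟨rfl, by simp [hh]⟩
  have ha' : (a == '.') = false := beq_eq_false_iff_ne.mpr ha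
  have hb' : (b == '.') = false := beq_eq_false_iff_ne.mpr hb
  intro heq
  unfold generate_every_split_of_a_morpheme_via_syllables
    generate_every_split_of_a_morpheme_via_syllables_alt at heq
  rw [hcs] at heq
  have er : List.range 2 = [0, 1] := by decide
  have e0 : pvBinFormat 1 0 = ['0'] := by decide
  have e1 : pvBinFormat 1 1 = ['1'] := by decide
  simp [er, e0, e1, ha', hb', ha, hb, pvAltGo, List.foldl_cons, List.foldl_nil, List.range_one] at heq
  have h3 := congrArg String.toList heq
  simp at h3
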